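-- pv_equiv track=rewrite | github.com/2GyounnnG/causalworld | scripts/run_node_order_sanity_check.py | strip_option
-- ===== SOURCE A (Python) =====
-- def strip_option(argv: list[str], option: str) -> list[str]:
--     out: list[str] = []
--     skip_next = False
--     for idx, value in enumerate(argv):
--         if skip_next:
--             skip_next = False
--             continue
--         if value == option:
--             skip_next = idx + 1 < len(argv)
--             continue
--         if value.startswith(f"{option}="):
--             continue
--         out.append(value)
--     return out
-- ===== SOURCE B (Python) =====
-- def strip_option(argv: list[str], option: str) -> list[str]:
--     # Two staged passes with a closed-form KEEP characterisation: an element is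
--     # kept iff it is not the option, not an "option=..." token, and the run of
--     # consecutive `option` entries immediately before it has EVEN length (an
--     # odd run means the last option of the run consumes this element as its value).
--     prefix = option + "="
--     runs: list[int] = []
--     r = 0
--     for v in argv:
--         runs.append(r)
--         r = r + 1 if v == option else 0
--     return [v for v, r in zip(argv, runs)
--             if v != option and not v.startswith(prefix) and r % 2 == 0]
-- ===== Notes on version B (the rewrite author's own statement) =====
-- stated objective: alternative
-- what changed: Replaced the stateful skip_next filter loop by two staged passes built on a closed-form characterisation: first compute for each position the length of the run of consecutive option entries immediately before it, then keep exactly the elements that are not the option, not an option= token, and preceded by an even option-run (odd run = consumed as the option's value); the option+'=' prefix is built once instead of via an f-string per element.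
import Mathlib
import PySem

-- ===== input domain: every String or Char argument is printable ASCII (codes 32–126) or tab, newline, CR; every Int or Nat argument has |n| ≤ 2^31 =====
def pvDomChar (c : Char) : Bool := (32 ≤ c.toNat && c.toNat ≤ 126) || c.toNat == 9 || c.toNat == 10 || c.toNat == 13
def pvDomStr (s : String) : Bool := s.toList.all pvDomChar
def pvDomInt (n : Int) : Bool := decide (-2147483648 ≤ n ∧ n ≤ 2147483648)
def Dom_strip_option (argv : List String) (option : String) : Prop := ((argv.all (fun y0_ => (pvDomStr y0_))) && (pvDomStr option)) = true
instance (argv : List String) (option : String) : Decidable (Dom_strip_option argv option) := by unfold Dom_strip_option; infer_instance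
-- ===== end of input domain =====

-- B replaces A's stateful skip_next filter by two staged passes built on a closed-form
-- characterisation (keep iff not option, not option=, and preceded by an EVEN run of options).
-- ===== PORT A =====
def strip_option (argv : List String) (option : String) : List String :=
  (((PySem.List.enumerate argv 0).foldl (fun (st : List String × Bool) (p : Int × String) =>
    if st.2 then (st.1, false)
    else if p.2 == option then (st.1, decide (p.1 + 1 < (argv.length : Int)))
    else if PySem.Str.startswith p.2 (option ++ "=") then st
    else (st.1 ++ [p.2], st.2)) ([], false))).1

-- ===== PORT B =====
def strip_option_alt (argv : List String) (option : String) : List String :=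
  let prefix_ := option ++ "="
  let runs := (argv.foldl (fun (st : List Nat × Nat) v =>
      (st.1 ++ [st.2], if v == option then st.2 + 1 else 0)) ([], 0)).1
  ((argv.zip runs).filter (fun p =>
      p.1 != option && !(PySem.Str.startswith p.1 prefix_) && p.2 % 2 == 0)).map Prod.fst

-- ===== PRECONDITION & SPEC =====
def Spec_strip_option (argv : List String) (option : String) (out : List String) : Prop := out = strip_option_alt argv option
instance (argv : List String) (option : String) (out : List String) : Decidable (Spec_strip_option argv option out) := by unfold Spec_strip_option; infer_instance

-- ===== CLAIM (what is proved, stated in full; the proofs are below) =====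
def Claim_equal_strip_option : Prop := ∀ (argv : List String) (option : String), Dom_strip_option argv option → Spec_strip_option argv option (strip_option argv option)

-- ===== LEMMAS AND PROOFS =====

/-- The run-lengths list of B's first pass, as a structural recursion. -/
def runsList (option : String) (r : Nat) : List String → List Nat
  | [] => []
  | v :: t => r :: runsList option (if v == option then r + 1 else 0) t

/-- The combined result of B's two passes, fused for reasoning. -/
def bGo (option : String) (r : Nat) : List String → List String
  | [] => []
  | v :: t =>
    (if v != option && !(PySem.Str.startswith v (option ++ "=")) && r % 2 == 0 then [v] else [])
      ++ bGo option (if v == option then r + 1 else 0) t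

theorem runs_fold (option : String) :
    ∀ (l : List String) (acc : List Nat) (r : Nat),
      (l.foldl (fun (st : List Nat × Nat) v =>
        (st.1 ++ [st.2], if v == option then st.2 + 1 else 0)) (acc, r)).1
      = acc ++ runsList option r l := by
  intro l
  induction l with
  | nil => intro acc r; simp [runsList]
  | cons v t ih =>
    intro acc r
    simp only [List.foldl_cons, runsList]
    rw [ih]
    simp

theorem zip_filter_eq_bGo (option : String) :
    ∀ (l : List String) (r : Nat),
      ((l.zip (runsList option r l)).filter (fun p =>
        p.1 != option && !(PySem.Str.startswith p.1 (option ++ "=")) && p.2 % 2 == 0)).map Prod.fst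
      = bGo option r l := by
  intro l
  induction l with
  | nil => intro r; simp [runsList, bGo]
  | cons v t ih =>
    intro r
    simp only [runsList, List.zip_cons_cons, List.filter_cons, bGo]
    cases h : (v != option && !(PySem.Str.startswith v (option ++ "=")) && r % 2 == 0) with
    | true => rw [if_pos rfl, if_pos rfl, List.map_cons, ih]; rfl
    | false =>
      rw [if_neg (show ¬(false = true) from by simp), if_neg (show ¬(false = true) from by simp), ih]
      rfl

theorem alt_eq_bGo (argv : List String) (option : String) :
    strip_option_alt argv option = bGo option 0 argv := by
  unfold strip_option_alt
  rw [runs_fold option argv [] 0]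
  simpa using zip_filter_eq_bGo option argv 0

theorem strip_option_aux (argv : List String) (option : String) :
    ∀ (l : List String) (i : Nat) (acc : List String) (skip : Bool) (r : Nat),
      i + l.length = argv.length → skip = decide (r % 2 = 1) →
      ((PySem.List.enumerate l (i : Int)).foldl (fun (st : List String × Bool) (p : Int × String) =>
        if st.2 then (st.1, false)
        else if p.2 == option then (st.1, decide (p.1 + 1 < (argv.length : Int)))
        else if PySem.Str.startswith p.2 (option ++ "=") then st
        else (st.1 ++ [p.2], st.2)) (acc, skip)).1
      = acc ++ bGo option r l := by
  intro l
  induction l with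
  | nil => intro i acc skip r _ _; simp [PySem.List.enumerate_nil, bGo]
  | cons v t ih =>
    intro i acc skip r hlen hsk
    rw [PySem.List.enumerate_cons]
    simp only [List.foldl_cons]
    have hcast : ((i : Int) + 1) = ((i + 1 : Nat) : Int) := by omega
    by_cases hs : skip = true
    · -- consumed element: A drops it; B's keep condition is false since r is odd
      have hrodd : r % 2 = 1 := by
        by_contra h; simp [hsk, h] at hs
      have hc : (v != option && !(PySem.Str.startswith v (option ++ "=")) && r % 2 == 0) = false := by
        simp [hrodd]
      simp only [hs, if_pos]
      rw [hcast, ih (i + 1) acc false (if v == option then r + 1 else 0)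
        (by simp at hlen ⊢; omega) (by by_cases hv : v == option <;> simp [hv, Nat.add_mod, hrodd])]
      simp only [bGo]
      rw [hc]
      simp
    · have hsf : skip = false := by simpa using hs
      have hreven : r % 2 = 0 := by
        by_contra h
        have : r % 2 = 1 := by omega
        simp [this] at hsk; exact hs hsk
      simp only [hsf, Bool.false_eq_true, if_false]
      by_cases hv : (v == option) = true
      · have hveq : v = option := by simpa using hv
        have hc : (v != option && !(PySem.Str.startswith v (option ++ "=")) && r % 2 == 0) = false := by
          simp [hveq]
        simp only [hv, if_pos]
        cases t with
        | nil =>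
          simp only [PySem.List.enumerate_nil, List.foldl_nil, bGo]
          rw [hc]
          simp
        | cons w t' =>
          have hi1 : ((i : Int) + 1 < (argv.length : Int)) := by
            simp at hlen; omega
          rw [decide_eq_true hi1]
          rw [hcast, ih (i + 1) acc true (r + 1)
            (by simp at hlen ⊢; omega)
            (by have h1 : (r + 1) % 2 = 1 := by omega
                simp [h1])]
          simp only [bGo]
          rw [hc]
          simp [hv]
      · rw [Bool.not_eq_true] at hv
        simp only [hv, Bool.false_eq_true, if_false]
        by_cases hp : PySem.Str.startswith v (option ++ "=") = true
        · have hp' : PySem.Chars.startswith v.toList (option.toList ++ ['=']) = true := by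
            simpa using hp
          have hc : (v != option && !(PySem.Str.startswith v (option ++ "=")) && r % 2 == 0) = false := by
            simp [hp']
          simp only [hp, if_pos]
          rw [hcast, ih (i + 1) acc false 0 (by simp at hlen ⊢; omega) (by simp)]
          simp only [bGo]
          rw [hc]
          simp [hv]
        · rw [Bool.not_eq_true] at hp
          have hc : (v != option && !(PySem.Str.startswith v (option ++ "=")) && r % 2 == 0) = true := by
            simp [hreven]
            exact ⟨by simpa using hv, by simpa using hp⟩
          simp only [hp, Bool.false_eq_true, if_false]
          rw [hcast, ih (i + 1) (acc ++ [v]) false 0 (by simp at hlen ⊢; omega) (by simp)]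
          simp only [bGo]
          rw [hc]
          simp [hv]

-- ===== VERDICT (by name: the statement is the Claim_ definition above) =====
theorem strip_option_spec : Claim_equal_strip_option := by
  intro argv option _
  unfold Spec_strip_option strip_option
  rw [alt_eq_bGo]
  simpa using strip_option_aux argv option argv 0 [] false 0 (by simp) (by simp)
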